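-- pv_equiv track=rewrite | github.com/pypi-data/pypi-mirror-208 | packages/cardmasking/cardmasking-0.1.1-py3-none-any.whl/cardmasking/masking.py | cardmapping
-- ===== SOURCE A (Python) =====
-- def cardmapping(card,cvv,ExpiryDate):
--     x = 0
--     card_num =""
--     cvv_num =""
--     expiry = ""
--     for i in card:
--         if x >3 and x<12:
--             card_num += "*"
--         else:
--             card_num+=i
--         x+=1
--
--     for i in cvv:
--         cvv_num += "*"
--
--     for i in ExpiryDate:
--         expiry += "*"
--
--     return card_num,cvv_num,expiry
-- ===== SOURCE B (Python) =====
-- def cardmapping(card, cvv, ExpiryDate):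
--     card_num = card[:4] + "*" * max(0, min(len(card), 12) - 4) + card[12:]
--     cvv_num = "*" * len(cvv)
--     expiry = "*" * len(ExpiryDate)
--     return card_num, cvv_num, expiry
-- ===== Notes on version B (the rewrite author's own statement) =====
-- stated objective: simpler
-- what changed: Replaces the three per-character index-tracking loops with direct slicing and string repetition: card = first 4 chars + '*' times the number of existing positions 4..11 + chars from 12 on; cvv and expiry are '*' times their lengths.
import Mathlib
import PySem

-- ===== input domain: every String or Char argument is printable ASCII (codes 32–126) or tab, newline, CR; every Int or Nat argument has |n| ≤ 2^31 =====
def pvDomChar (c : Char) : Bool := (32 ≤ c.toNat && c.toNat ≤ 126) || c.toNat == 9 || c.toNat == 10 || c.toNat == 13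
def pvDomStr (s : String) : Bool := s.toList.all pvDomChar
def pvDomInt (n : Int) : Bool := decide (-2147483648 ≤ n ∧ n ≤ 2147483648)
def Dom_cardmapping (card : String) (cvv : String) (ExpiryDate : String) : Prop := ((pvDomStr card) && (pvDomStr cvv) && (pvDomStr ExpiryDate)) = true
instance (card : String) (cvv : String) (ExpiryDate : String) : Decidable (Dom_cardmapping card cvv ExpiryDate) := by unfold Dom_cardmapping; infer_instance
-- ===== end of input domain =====

-- B replaces A's three index-tracking character loops with slicing and repetition (objective: simpler).

-- ===== PORT A =====
-- per-character loop over card with an index counter x; mask positions 4..11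
def cardmapping (card : String) (cvv : String) (ExpiryDate : String) : String × String × String :=
  let s := card.toList.foldl
    (fun (s : Int × List Char) i =>
      (s.1 + 1, if 3 < s.1 ∧ s.1 < 12 then s.2 ++ ['*'] else s.2 ++ [i])) (0, [])
  let cvv_num := cvv.toList.foldl (fun a _ => a ++ ['*']) []
  let expiry := ExpiryDate.toList.foldl (fun a _ => a ++ ['*']) []
  (String.ofList s.2, String.ofList cvv_num, String.ofList expiry)

-- ===== PORT B =====
-- card[:4] + '*' * max(0, min(len(card),12) - 4) + card[12:]; '*' * len for cvv / expiry
def cardmapping_alt (card : String) (cvv : String) (ExpiryDate : String) : String × String × String :=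
  let l := card.toList
  let n : Int := l.length
  (String.ofList (l.take 4 ++ List.replicate (max 0 (min n 12 - 4)).toNat '*' ++ l.drop 12),
   String.ofList (List.replicate cvv.toList.length '*'),
   String.ofList (List.replicate ExpiryDate.toList.length '*'))

-- ===== PRECONDITION & SPEC =====
def Spec_cardmapping (card : String) (cvv : String) (ExpiryDate : String) (out : String × String × String) : Prop := out = cardmapping_alt card cvv ExpiryDate
instance (card : String) (cvv : String) (ExpiryDate : String) (out : String × String × String) : Decidable (Spec_cardmapping card cvv ExpiryDate out) := by unfold Spec_cardmapping; infer_instance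

-- ===== CLAIM (what is proved, stated in full; the proofs are below) =====
def Claim_equal_cardmapping : Prop := ∀ (card : String) (cvv : String) (ExpiryDate : String), Dom_cardmapping card cvv ExpiryDate → Spec_cardmapping card cvv ExpiryDate (cardmapping card cvv ExpiryDate)

-- ===== LEMMAS AND PROOFS =====

-- A's star-appending loop builds a replicate
theorem starFold_eq (l : List Char) (acc : List Char) :
    l.foldl (fun a _ => a ++ ['*']) acc = acc ++ List.replicate l.length '*' := by
  induction l generalizing acc with
  | nil => simp
  | cons c cs ih =>
    rw [List.foldl_cons, ih, List.append_assoc]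
    simp [List.replicate_succ]

-- the result of A's card loop, written as structural recursion on the list
def maskFrom (x : Int) : List Char → List Char
  | [] => []
  | c :: cs => (if 3 < x ∧ x < 12 then '*' else c) :: maskFrom (x + 1) cs

theorem foldA_eq (l : List Char) (x : Int) (acc : List Char) :
    l.foldl (fun (s : Int × List Char) i =>
      (s.1 + 1, if 3 < s.1 ∧ s.1 < 12 then s.2 ++ ['*'] else s.2 ++ [i])) (x, acc)
    = (x + l.length, acc ++ maskFrom x l) := by
  induction l generalizing x acc with
  | nil => simp [maskFrom]
  | cons c cs ih =>
    simp only [List.foldl_cons, maskFrom, ih]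
    split_ifs with h <;> simp <;> omega

theorem length_maskFrom (x : Int) (l : List Char) : (maskFrom x l).length = l.length := by
  induction l generalizing x with
  | nil => rfl
  | cons c cs ih => simp [maskFrom, ih]

theorem getElem_maskFrom (x : Int) (l : List Char) (k : Nat) (hk : k < l.length) :
    (maskFrom x l)[k]'(by rw [length_maskFrom]; exact hk)
      = if 3 < x + k ∧ x + k < 12 then '*' else l[k] := by
  induction l generalizing x k with
  | nil => simp at hk
  | cons c cs ih =>
    cases k with
    | zero => simp [maskFrom]
    | succ m =>
      simp only [maskFrom, List.getElem_cons_succ]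
      rw [ih (x + 1) m (by simpa using hk)]
      have : x + 1 + (m : Int) = x + ((m : Nat) + 1 : Nat) := by push_cast; ring
      rw [this]

theorem maskFrom_zero_eq (l : List Char) :
    maskFrom 0 l = l.take 4 ++ List.replicate (max 0 (min (l.length : Int) 12 - 4)).toNat '*' ++ l.drop 12 := by
  have ht : (max 0 (min (l.length : Int) 12 - 4)).toNat = min l.length 12 - 4 := by omega
  apply List.ext_getElem
  · simp [length_maskFrom, ht]; omega
  · intro k h1 h2
    have hlen : k < l.length := by simpa [length_maskFrom] using h1
    rw [getElem_maskFrom 0 l k hlen]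
    simp only [List.getElem_append]
    simp only [List.length_append, List.length_take, List.length_replicate, List.getElem_take,
      List.getElem_replicate, List.getElem_drop, ht]
    split_ifs <;> first | rfl | (congr 1; omega)

-- ===== VERDICT (by name: the statement is the Claim_ definition above) =====
theorem cardmapping_spec : Claim_equal_cardmapping := by
  intro card cvv ExpiryDate _
  unfold Spec_cardmapping cardmapping cardmapping_alt
  simp only [foldA_eq, starFold_eq, List.nil_append, maskFrom_zero_eq]
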